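-- pv_equiv track=rewrite | github.com/doehy/algorithm | Programmers/Personnel_evaluation.py | solution
-- ===== SOURCE A (Python) =====
-- def solution(scores):
--     answer = 1
--     wangho = scores[0]
--     wangho_sum = wangho[0] + wangho[1]
--     scores = sorted(scores, key = lambda x : (-x[0], x[1]))
--     bf = 0
--     for score in scores:
--         if score[0] > wangho[0] and score[1] > wangho[1]:
--             return -1
--         if bf <= score[1]: # 전에꺼보다만 크거나 같으면 되는 이유는 작으면 x[0]에 대해서 내림차순 했으니 둘다 작아서 인센티브를 못 받고,
--             # 그렇게 치면 x[1]에 대해서 오름차순으로 정렬했으니 무조건 크거나 같다고 할 수 있겠지만 x[0]이 달라질 때 조건이 달라진다. 그래서 계속 bf에 값을 넣어주는 것이다.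
--             if score[0] + score[1] > wangho_sum:
--                 answer += 1
--             bf = score[1]
--     return answer
-- ===== SOURCE B (Python) =====
-- def solution(scores):
--     wangho = scores[0]
--     wangho_sum = wangho[0] + wangho[1]
--
--     def dominated(p):
--         return any(q[0] > p[0] and q[1] > p[1] for q in scores)
--
--     if dominated(wangho):
--         return -1
--     return 1 + sum(1 for p in scores
--                    if not dominated(p) and p[0] + p[1] > wangho_sum)
-- ===== Notes on version B (the rewrite author's own statement) =====
-- stated objective: alternative
-- what changed: B drops A's sort-by-(-x0,x1) plus running-maximum bf scan and instead counts, by a direct quadratic scan, the people strictly dominated by nobody whose score sum exceeds the reference person's.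
-- intended difference: On inputs where nobody strictly dominates scores[0] but some person p with p[1] < 0 and p[0]+p[1] > scores[0][0]+scores[0][1] is strictly dominated by nobody, A's bf starts at 0 and never counts p, returning a smaller count, while B counts every such p — the uniform dominance rule, which is the intended behaviour. — e.g. on solution([[0, 0], [5, -1]]): A returns 1, B returns 2
import Mathlib
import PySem

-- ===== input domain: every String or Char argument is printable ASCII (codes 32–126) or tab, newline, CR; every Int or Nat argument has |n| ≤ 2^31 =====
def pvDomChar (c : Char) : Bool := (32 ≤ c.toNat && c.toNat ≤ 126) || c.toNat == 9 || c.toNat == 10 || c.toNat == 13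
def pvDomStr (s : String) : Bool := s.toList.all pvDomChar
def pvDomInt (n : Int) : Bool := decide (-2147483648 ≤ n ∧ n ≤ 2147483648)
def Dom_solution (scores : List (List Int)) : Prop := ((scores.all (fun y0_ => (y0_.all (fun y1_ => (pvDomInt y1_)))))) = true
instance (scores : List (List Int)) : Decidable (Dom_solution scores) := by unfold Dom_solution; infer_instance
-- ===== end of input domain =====

-- B replaces A's sort-plus-running-maximum scan by a direct dominance scan ('alternative'); A's running
-- maximum bf starts at 0, which silently disqualifies rows whose second score is negative — B applies the
-- dominance rule uniformly there (see D_solution).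

-- shared indexing helper: s[i] (on every admitted input the index is in range, so the default is never used)
def pvIdx (s : List Int) (i : Int) : Int := (PySem.List.pyGet? s i).getD 0

-- ===== PORT A =====
def solLoopA (w0 w1 wsum : Int) : List (List Int) → Int → Int → Int
  | [], _bf, ans => ans
  | score :: rest, bf, ans =>
    if pvIdx score 0 > w0 ∧ pvIdx score 1 > w1 then -1
    else if bf ≤ pvIdx score 1 then
      solLoopA w0 w1 wsum rest (pvIdx score 1)
        (if pvIdx score 0 + pvIdx score 1 > wsum then ans + 1 else ans)
    else solLoopA w0 w1 wsum rest bf ans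

def solution (scores : List (List Int)) : Int :=
  let wangho := (PySem.List.pyGet? scores 0).getD []
  let wangho_sum := pvIdx wangho 0 + pvIdx wangho 1
  let sortedScores := PySem.List.sorted2 scores (fun x => -(pvIdx x 0)) (fun x => pvIdx x 1)
  solLoopA (pvIdx wangho 0) (pvIdx wangho 1) wangho_sum sortedScores 0 1

-- ===== PORT B =====
def pvBeaten (scores : List (List Int)) (p : List Int) : Bool :=
  scores.any (fun q => decide (pvIdx q 0 > pvIdx p 0) && decide (pvIdx q 1 > pvIdx p 1))

def solution_alt (scores : List (List Int)) : Int :=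
  let wangho := (PySem.List.pyGet? scores 0).getD []
  let wangho_sum := pvIdx wangho 0 + pvIdx wangho 1
  if pvBeaten scores wangho then -1
  else 1 + ((scores.countP
      (fun p => !pvBeaten scores p && decide (pvIdx p 0 + pvIdx p 1 > wangho_sum))) : Int)

-- ===== PRECONDITION & SPEC =====
-- Pre_ excludes exactly the inputs on which A raises IndexError: empty scores, or a row with fewer than two entries.
def Pre_solution (scores : List (List Int)) : Prop :=
  scores ≠ [] ∧ ∀ s ∈ scores, 2 ≤ s.length
instance (scores : List (List Int)) : Decidable (Pre_solution scores) := by unfold Pre_solution; infer_instance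

def pvWitness_solution : List (List Int) := [[2, 2], [1, 4], [3, 2], [3, 2], [2, 1]]

-- A initializes its running maximum bf to 0, so an undominated person with a negative second score is never counted:
-- on inputs where nobody strictly dominates scores[0] but some p with p[1] < 0 and p[0]+p[1] > scores[0][0]+scores[0][1]
-- is strictly dominated by nobody, A returns a count missing every such p, while B counts them — the uniform
-- dominance rule, which is the intended behaviour.
def D_solution (scores : List (List Int)) : Prop :=
  let w := scores.headD []
  ∃ p ∈ scores, p.tail.headI < 0 ∧ (p.take 2).sum > (w.take 2).sum ∧
    ∀ q ∈ scores, ∀ r ∈ [p, w], q.headI ≤ r.headI ∨ q.tail.headI ≤ r.tail.headI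
instance (scores : List (List Int)) : Decidable (D_solution scores) := by unfold D_solution; infer_instance

def Spec_solution (scores : List (List Int)) (out : Int) : Prop := ¬ D_solution scores → out = solution_alt scores
instance (scores : List (List Int)) (out : Int) : Decidable (Spec_solution scores out) := by unfold Spec_solution; infer_instance

def pvDiffWitness_solution : List (List Int) := [[0, 0], [5, -1]]
def pvDiffWitnessOut_solution : Int × Int := (1, 2)

-- ===== CLAIM (what is proved, stated in full; the proofs are below) =====
def Claim_unchanged_solution : Prop := ∀ (scores : List (List Int)), Dom_solution scores → Pre_solution scores → Spec_solution scores (solution scores)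
def Claim_changed_solution : Prop := Dom_solution (pvDiffWitness_solution) ∧ Pre_solution (pvDiffWitness_solution) ∧ D_solution (pvDiffWitness_solution) ∧ solution (pvDiffWitness_solution) = pvDiffWitnessOut_solution.1 ∧ solution_alt (pvDiffWitness_solution) = pvDiffWitnessOut_solution.2 ∧ pvDiffWitnessOut_solution.1 ≠ pvDiffWitnessOut_solution.2
def Claim_exact_solution : Prop := ∀ (scores : List (List Int)), Dom_solution scores → Pre_solution scores → D_solution scores → solution scores ≠ solution_alt scores

-- ===== LEMMAS AND PROOFS =====

-- the (≤ on the sort key) relation A's sorted list is pairwise ordered by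
def Rkey (a b : List Int) : Prop :=
  pvIdx b 0 < pvIdx a 0 ∨ (pvIdx a 0 = pvIdx b 0 ∧ pvIdx a 1 ≤ pvIdx b 1)

-- the rows A's bf test actually lets through: nonnegative second score and strictly dominated by nobody
def EligB (S : List (List Int)) (p : List Int) : Bool :=
  decide (0 ≤ pvIdx p 1) && !pvBeaten S p

lemma pvIdx_zero (s : List Int) : pvIdx s 0 = s.headI := by
  cases s <;> simp [pvIdx, PySem.List.pyGet?, PySem.List.pyIdx?]

lemma pvIdx_one (s : List Int) : pvIdx s 1 = s.tail.headI := by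
  rcases s with _ | ⟨a, _ | ⟨b, t⟩⟩ <;> simp [pvIdx, PySem.List.pyGet?, PySem.List.pyIdx?]

lemma take2_sum (s : List Int) : (s.take 2).sum = s.headI + s.tail.headI := by
  rcases s with _ | ⟨a, _ | ⟨b, t⟩⟩ <;> simp

-- D_solution, unfolded to the dominance phrasing the proofs use
lemma D_iff (w : List Int) (t : List (List Int)) :
    D_solution (w :: t) ↔ ∃ p ∈ w :: t, pvIdx p 1 < 0 ∧
      pvIdx p 0 + pvIdx p 1 > pvIdx w 0 + pvIdx w 1 ∧
      (∀ q ∈ w :: t, ¬(pvIdx q 0 > pvIdx p 0 ∧ pvIdx q 1 > pvIdx p 1)) ∧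
      (∀ q ∈ w :: t, ¬(pvIdx q 0 > pvIdx w 0 ∧ pvIdx q 1 > pvIdx w 1)) := by
  unfold D_solution
  simp only [List.headD_cons, pvIdx_zero, pvIdx_one, take2_sum]
  constructor
  · rintro ⟨p, hp, h1, h2, h3⟩
    exact ⟨p, hp, h1, h2,
      fun q hq => by have := h3 q hq p (by simp); omega,
      fun q hq => by have := h3 q hq w (by simp); omega⟩
  · rintro ⟨p, hp, h1, h2, h3, h4⟩
    refine ⟨p, hp, h1, h2, fun q hq r hr => ?_⟩
    rcases List.mem_cons.mp hr with rfl | hr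
    · have := h3 q hq; omega
    · rw [List.mem_singleton.mp hr]; have := h4 q hq; omega

lemma dominated_eq_false_iff (S : List (List Int)) (p : List Int) :
    pvBeaten S p = false ↔ ∀ q ∈ S, ¬(pvIdx q 0 > pvIdx p 0 ∧ pvIdx q 1 > pvIdx p 1) := by
  simp [pvBeaten, List.any_eq_false]

lemma EligB_eq_true_iff (S : List (List Int)) (p : List Int) :
    EligB S p = true ↔ 0 ≤ pvIdx p 1 ∧ ∀ q ∈ S, ¬(pvIdx q 0 > pvIdx p 0 ∧ pvIdx q 1 > pvIdx p 1) := by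
  rw [EligB, Bool.and_eq_true, Bool.not_eq_true', decide_eq_true_iff, dominated_eq_false_iff]

lemma pyGet_zero (w : List Int) (t : List (List Int)) :
    (PySem.List.pyGet? (w :: t) (0 : Int)).getD [] = w := by
  simp [PySem.List.pyGet?, PySem.List.pyIdx?]

lemma sorted2_eq_sorted_lex (xs : List (List Int)) (k1 k2 : List Int → Int) :
    PySem.List.sorted2 xs k1 k2 = PySem.List.sorted xs (fun x => toLex (k1 x, k2 x)) false := by
  have hb : (fun (a b : List Int) => decide (k1 a < k1 b) || (!decide (k1 b < k1 a) && decide (k2 a < k2 b)))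
      = (fun (a b : List Int) => decide (toLex (k1 a, k2 a) < toLex (k1 b, k2 b))) := by
    funext a b
    rw [Bool.eq_iff_iff]
    simp only [Prod.Lex.toLex_lt_toLex, Bool.or_eq_true, Bool.and_eq_true, Bool.not_eq_true',
      decide_eq_true_iff, decide_eq_false_iff_not]
    omega
  simp only [PySem.List.sorted2, PySem.List.sorted, Bool.false_eq_true, if_false, hb]

lemma sorted2_pairwise_key (xs : List (List Int)) :
    (PySem.List.sorted2 xs (fun x => -(pvIdx x 0)) (fun x => pvIdx x 1)).Pairwise Rkey := by
  rw [sorted2_eq_sorted_lex]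
  refine (PySem.List.sorted_pairwise xs (fun x => toLex (-(pvIdx x 0), pvIdx x 1))).imp ?_
  intro a b hab
  rw [Prod.Lex.toLex_le_toLex] at hab
  unfold Rkey
  dsimp at hab
  omega

-- among the strict dominators of s there is one of maximal first score; it is itself undominated
lemma exists_undom_dom (S : List (List Int)) (s : List Int)
    (h : ∃ q ∈ S, pvIdx q 0 > pvIdx s 0 ∧ pvIdx q 1 > pvIdx s 1) :
    ∃ r ∈ S, (pvIdx r 0 > pvIdx s 0 ∧ pvIdx r 1 > pvIdx s 1) ∧
      ∀ u ∈ S, ¬(pvIdx u 0 > pvIdx r 0 ∧ pvIdx u 1 > pvIdx r 1) := by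
  obtain ⟨q, hq, hq01⟩ := h
  set M := S.filter (fun x => decide (pvIdx x 0 > pvIdx s 0) && decide (pvIdx x 1 > pvIdx s 1)) with hM
  have hqM : q ∈ M := by simp [hM, List.mem_filter, hq, hq01.1, hq01.2]
  obtain ⟨r, hr⟩ : ∃ r, r ∈ M.argmax (fun x => pvIdx x 0) := by
    cases hargs : M.argmax (fun x => pvIdx x 0) with
    | none => exact absurd (List.argmax_eq_none.mp hargs ▸ hqM) (List.not_mem_nil)
    | some r => exact ⟨r, by simp⟩
  have hrM := List.argmax_mem hr
  have hrS : r ∈ S := (List.mem_filter.mp hrM).1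
  have hrd : pvIdx r 0 > pvIdx s 0 ∧ pvIdx r 1 > pvIdx s 1 := by
    have := (List.mem_filter.mp hrM).2; simp at this; exact this
  refine ⟨r, hrS, hrd, ?_⟩
  intro u hu hud
  have huM : u ∈ M := by
    simp [hM, List.mem_filter, hu]
    constructor <;> omega
  exact List.not_lt_of_mem_argmax huM hr hud.1

lemma loop_neg (w0 w1 wsum : Int) (L : List (List Int)) (bf ans : Int)
    (h : ∃ s ∈ L, pvIdx s 0 > w0 ∧ pvIdx s 1 > w1) :
    solLoopA w0 w1 wsum L bf ans = -1 := by
  induction L generalizing bf ans with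
  | nil => simp at h
  | cons x L ih =>
    rw [solLoopA]
    by_cases hx : pvIdx x 0 > w0 ∧ pvIdx x 1 > w1
    · rw [if_pos hx]
    · rw [if_neg hx]
      obtain ⟨s, hs, hsd⟩ := h
      rcases List.mem_cons.mp hs with rfl | hs'
      · exact absurd hsd hx
      · split <;> exact ih _ _ ⟨s, hs', hsd⟩

-- the crux: when bf is the running maximum of the second scores of the eligible rows already seen
-- (never negative), A's test 'bf ≤ s[1]' accepts s exactly when s has a nonnegative second score
-- and is strictly dominated by nobody in the whole list
lemma bf_le_iff_elig (S L₁ L₂ : List (List Int)) (s : List Int) (bf : Int)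
    (hpw : (L₁ ++ s :: L₂).Pairwise Rkey)
    (hmem : ∀ q, q ∈ L₁ ++ s :: L₂ ↔ q ∈ S)
    (hbf0 : 0 ≤ bf)
    (hub : ∀ p ∈ L₁, EligB S p = true → pvIdx p 1 ≤ bf)
    (hwit : bf = 0 ∨ ∃ p ∈ L₁, EligB S p = true ∧ pvIdx p 1 = bf) :
    bf ≤ pvIdx s 1 ↔ EligB S s = true := by
  obtain ⟨hpwL₁, hpwcons, hcross⟩ := List.pairwise_append.mp hpw
  have hsL₂ : ∀ q ∈ L₂, Rkey s q := (List.pairwise_cons.mp hpwcons).1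
  constructor
  · intro hle
    have hs1 : 0 ≤ pvIdx s 1 := le_trans hbf0 hle
    rw [EligB_eq_true_iff]
    refine ⟨hs1, ?_⟩
    intro q hq hqd
    obtain ⟨r, hrS, hrd, hrund⟩ := exists_undom_dom S s ⟨q, hq, hqd⟩
    have hrfull := (hmem r).mpr hrS
    rcases List.mem_append.mp hrfull with hrL1 | hrcons
    · have hElig : EligB S r = true := by
        rw [EligB_eq_true_iff]
        exact ⟨by omega, hrund⟩
      have := hub r hrL1 hElig
      omega
    · rcases List.mem_cons.mp hrcons with rfl | hrL2
      · omega
      · have := hsL₂ r hrL2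
        unfold Rkey at this
        omega
  · intro helig
    obtain ⟨hs1, hund⟩ := (EligB_eq_true_iff S s).mp helig
    rcases hwit with rfl | ⟨p, hpL1, hpe, rfl⟩
    · exact hs1
    · have hRk : Rkey p s := hcross p hpL1 s (List.mem_cons_self)
      unfold Rkey at hRk
      rcases hRk with h01 | ⟨heq, hle⟩
      · by_contra hgt
        have hpS : p ∈ S := (hmem p).mp (List.mem_append.mpr (Or.inl hpL1))
        exact hund p hpS ⟨h01, by omega⟩
      · exact hle

lemma loop_count (S : List (List Int)) (w0 w1 wsum : Int)
    (L₂ : List (List Int)) : ∀ (L₁ : List (List Int)) (bf ans : Int),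
    (L₁ ++ L₂).Pairwise Rkey →
    (∀ q, q ∈ L₁ ++ L₂ ↔ q ∈ S) →
    (∀ s ∈ L₂, ¬(pvIdx s 0 > w0 ∧ pvIdx s 1 > w1)) →
    0 ≤ bf →
    (∀ p ∈ L₁, EligB S p = true → pvIdx p 1 ≤ bf) →
    (bf = 0 ∨ ∃ p ∈ L₁, EligB S p = true ∧ pvIdx p 1 = bf) →
    solLoopA w0 w1 wsum L₂ bf ans
      = ans + ((L₂.countP (fun s => EligB S s && decide (pvIdx s 0 + pvIdx s 1 > wsum))) : Int) := by
  induction L₂ with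
  | nil => intro L₁ bf ans _ _ _ _ _ _; simp [solLoopA]
  | cons s L₂ ih =>
    intro L₁ bf ans hpw hmem hnd hbf0 hub hwit
    rw [solLoopA, if_neg (hnd s List.mem_cons_self)]
    have hiff := bf_le_iff_elig S L₁ L₂ s bf hpw hmem hbf0 hub hwit
    rw [List.append_cons] at hpw hmem
    by_cases hb : bf ≤ pvIdx s 1
    · have he : EligB S s = true := hiff.mp hb
      have hs1 : 0 ≤ pvIdx s 1 := le_trans hbf0 hb
      rw [if_pos hb]
      rw [ih (L₁ ++ [s]) (pvIdx s 1) _ hpw hmem (fun x hx => hnd x (List.mem_cons_of_mem s hx)) hs1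
        (by intro p hp hpe
            rcases List.mem_append.mp hp with hp1 | hps
            · exact le_trans (hub p hp1 hpe) hb
            · rw [List.mem_singleton.mp hps])
        (Or.inr ⟨s, List.mem_append.mpr (Or.inr (List.mem_singleton_self s)), he, rfl⟩)]
      rw [List.countP_cons]
      simp only [he, Bool.true_and]
      by_cases hsum : pvIdx s 0 + pvIdx s 1 > wsum
      · rw [if_pos hsum, if_pos (decide_eq_true hsum)]
        push_cast; omega
      · rw [if_neg hsum, if_neg (by simpa using hsum)]
        push_cast; omega
    · have he : EligB S s = false := by
        cases hEl : EligB S s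
        · rfl
        · exact absurd (hiff.mpr hEl) hb
      rw [if_neg hb]
      rw [ih (L₁ ++ [s]) bf ans hpw hmem (fun x hx => hnd x (List.mem_cons_of_mem s hx)) hbf0
        (by intro p hp hpe
            rcases List.mem_append.mp hp with hp1 | hps
            · exact hub p hp1 hpe
            · rw [List.mem_singleton.mp hps] at hpe
              rw [he] at hpe; cases hpe)
        (by rcases hwit with h0 | ⟨p, hp, hpe, hpb⟩
            · exact Or.inl h0
            · exact Or.inr ⟨p, List.mem_append.mpr (Or.inl hp), hpe, hpb⟩)]
      rw [List.countP_cons]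
      simp [he]

-- when nobody strictly dominates scores[0], A's value is 1 + the number of rows that pass bf's test
lemma solution_eq_count (w : List Int) (t : List (List Int))
    (hndw : ∀ q ∈ w :: t, ¬(pvIdx q 0 > pvIdx w 0 ∧ pvIdx q 1 > pvIdx w 1)) :
    solution (w :: t)
      = 1 + (((w :: t).countP (fun s => EligB (w :: t) s &&
          decide (pvIdx s 0 + pvIdx s 1 > pvIdx w 0 + pvIdx w 1))) : Int) := by
  have hperm : (PySem.List.sorted2 (w :: t) (fun x => -(pvIdx x 0)) (fun x => pvIdx x 1)).Perm (w :: t) :=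
    PySem.List.sorted2_perm _ _ _ _
  have hcount := loop_count (w :: t) (pvIdx w 0) (pvIdx w 1) (pvIdx w 0 + pvIdx w 1)
      (PySem.List.sorted2 (w :: t) (fun x => -(pvIdx x 0)) (fun x => pvIdx x 1)) [] 0 1
      (by simpa using sorted2_pairwise_key (w :: t))
      (by intro q; simpa using hperm.mem_iff)
      (fun s hs => hndw s (hperm.subset hs))
      le_rfl (by intro p hp; simp at hp) (Or.inl rfl)
  rw [hperm.countP_eq] at hcount
  simp only [solution, pyGet_zero]
  exact hcount

lemma countP_lt_of_witness {α : Type} (l : List α) (f g : α → Bool)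
    (hmono : ∀ a ∈ l, f a = true → g a = true)
    (a : α) (ha : a ∈ l) (hf : f a = false) (hg : g a = true) :
    l.countP f < l.countP g := by
  obtain ⟨l1, l2, rfl⟩ := List.append_of_mem ha
  simp [List.countP_append, hf, hg]
  have h1 := List.countP_mono_left (l := l1) (p := f) (q := g)
    (fun x hx => hmono x (by simp [hx]))
  have h2 := List.countP_mono_left (l := l2) (p := f) (q := g)
    (fun x hx => hmono x (by simp [hx]))
  omega

lemma alt_eq_neg (w : List Int) (t : List (List Int)) (hd : pvBeaten (w :: t) w = true) :
    solution_alt (w :: t) = -1 := by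
  simp only [solution_alt, pyGet_zero, hd, if_true]

lemma alt_eq_count (w : List Int) (t : List (List Int)) (hd : pvBeaten (w :: t) w = false) :
    solution_alt (w :: t) = 1 + (((w :: t).countP (fun p => !pvBeaten (w :: t) p &&
      decide (pvIdx p 0 + pvIdx p 1 > pvIdx w 0 + pvIdx w 1))) : Int) := by
  simp only [solution_alt, pyGet_zero, hd, Bool.false_eq_true, if_false]

-- ===== VERDICT (by name: the statement is the Claim_ definition above) =====
theorem solution_spec : Claim_unchanged_solution := by
  intro scores _hdom hpre hnD
  obtain ⟨hne, -⟩ := hpre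
  cases scores with
  | nil => exact absurd rfl hne
  | cons w t =>
    by_cases hd : pvBeaten (w :: t) w = true
    · obtain ⟨q, hq, hqd⟩ := List.any_eq_true.mp hd
      have hqd' : pvIdx q 0 > pvIdx w 0 ∧ pvIdx q 1 > pvIdx w 1 := by simpa using hqd
      have hA : solution (w :: t) = -1 := by
        simp only [solution, pyGet_zero]
        exact loop_neg _ _ _ _ _ _
          ⟨q, (PySem.List.sorted2_perm (w :: t) (fun x => -(pvIdx x 0)) (fun x => pvIdx x 1)
            false).mem_iff.mpr hq, hqd'⟩
      rw [hA, alt_eq_neg w t hd]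
    · have hd' : pvBeaten (w :: t) w = false := by simpa using hd
      have hndw := (dominated_eq_false_iff _ _).mp hd'
      rw [solution_eq_count w t hndw, alt_eq_count w t hd']
      have hcongr : (w :: t).countP (fun s => EligB (w :: t) s &&
            decide (pvIdx s 0 + pvIdx s 1 > pvIdx w 0 + pvIdx w 1))
          = (w :: t).countP (fun p => !pvBeaten (w :: t) p &&
            decide (pvIdx p 0 + pvIdx p 1 > pvIdx w 0 + pvIdx w 1)) := by
        refine List.countP_congr ?_
        intro x hx
        simp only [EligB, Bool.and_eq_true, Bool.not_eq_true', decide_eq_true_iff]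
        constructor
        · rintro ⟨⟨-, hdx⟩, hsx⟩; exact ⟨hdx, hsx⟩
        · rintro ⟨hdx, hsx⟩
          refine ⟨⟨?_, hdx⟩, hsx⟩
          by_contra hneg
          exact hnD ((D_iff w t).mpr ⟨x, hx, by omega, by simpa using hsx,
            (dominated_eq_false_iff _ _).mp hdx, hndw⟩)
      rw [hcongr]

theorem solution_changed : Claim_changed_solution := by
  unfold Claim_changed_solution; decide

theorem solution_tight : Claim_exact_solution := by
  intro scores _hdom hpre hD
  obtain ⟨hne, -⟩ := hpre
  cases scores with
  | nil => exact absurd rfl hne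
  | cons w t =>
    obtain ⟨p, hp, hp1, hpsum, hpund, hfirst⟩ := (D_iff w t).mp hD
    have hd' : pvBeaten (w :: t) w = false := (dominated_eq_false_iff _ _).mpr hfirst
    rw [solution_eq_count w t hfirst, alt_eq_count w t hd']
    have hlt : (w :: t).countP (fun s => EligB (w :: t) s &&
          decide (pvIdx s 0 + pvIdx s 1 > pvIdx w 0 + pvIdx w 1))
        < (w :: t).countP (fun q => !pvBeaten (w :: t) q &&
          decide (pvIdx q 0 + pvIdx q 1 > pvIdx w 0 + pvIdx w 1)) := by
      refine countP_lt_of_witness _ _ _ ?_ p hp ?_ ?_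
      · intro a _ hfa
        simp only [EligB, Bool.and_eq_true, Bool.not_eq_true'] at hfa ⊢
        exact ⟨hfa.1.2, hfa.2⟩
      · simp only [EligB, Bool.and_eq_false_iff]
        left; left; simpa using hp1
      · simp only [Bool.and_eq_true, Bool.not_eq_true', decide_eq_true_iff]
        exact ⟨(dominated_eq_false_iff _ _).mpr hpund, hpsum⟩
    omega
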